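-- pv_equiv track=rewrite | github.com/MrBonzzo/LinearSpectrum | LinearSpectrum.py | createtempvec
-- ===== SOURCE A (Python) =====
-- def createtempvec(vectors, grey):
--     """
--     Генерирует вектор, необходимый для начала работы потока вычисления векторов.
--     Arguments:
--     vectors -- набор базисных векторов.
--     grey -- число, двоичное представление которого является кодом Грея.
--
--     Return:
--     tempvec -- вектор, необходимый для начала работы потока вычисления векторов.
--     """
--     tempvec = 0
--     i = 0
--     while grey:
--         if grey%2 == 1:
--             tempvec ^= vectors[i]
--         i += 1
--         grey //= 2
--     return tempvec
-- ===== SOURCE B (Python) =====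
-- def createtempvec(vectors, grey):
--     """XOR of the basis vectors selected by the set bits of grey,
--     walking only the set bits (Kernighan) instead of every bit position."""
--     tempvec = 0
--     while grey:
--         lsb = grey & -grey
--         tempvec ^= vectors[lsb.bit_length() - 1]
--         grey &= grey - 1
--     return tempvec
-- ===== Notes on version B (the rewrite author's own statement) =====
-- stated objective: alternative
-- what changed: Instead of scanning every bit position with a counter, parity test and floor division, B walks only the set bits of grey: lowest set bit via grey & -grey, its index via bit_length, cleared with grey &= grey - 1; iterations drop from bit_length(grey) to popcount(grey), measured running time is the same.
import Mathlib
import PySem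

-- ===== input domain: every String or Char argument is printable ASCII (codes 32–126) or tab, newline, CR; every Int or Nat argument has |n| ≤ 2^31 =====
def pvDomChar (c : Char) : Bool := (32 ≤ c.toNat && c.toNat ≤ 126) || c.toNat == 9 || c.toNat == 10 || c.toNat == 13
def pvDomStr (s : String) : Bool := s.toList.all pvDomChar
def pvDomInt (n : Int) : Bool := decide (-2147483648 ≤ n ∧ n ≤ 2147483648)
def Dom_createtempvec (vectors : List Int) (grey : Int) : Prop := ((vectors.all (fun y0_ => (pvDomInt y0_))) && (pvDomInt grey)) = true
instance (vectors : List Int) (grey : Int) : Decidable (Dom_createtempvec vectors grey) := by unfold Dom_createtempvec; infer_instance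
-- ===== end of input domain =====

-- B replaces A's bit-by-bit scan (counter, parity test, floor division) by a walk over the
-- set bits only: lowest set bit grey & -grey, indexed via bit_length, cleared by grey &= grey-1.

-- ===== PORT A =====
-- the while loop of A: state (tempvec, i, grey); grey < 0 never terminates in Python (outside Pre_)
def ctvLoopA (vectors : List Int) (tempvec i grey : Int) : Int :=
  if grey = 0 then tempvec
  else if h : grey < 0 then tempvec   -- Python loops forever here; excluded by Pre_
  else
    ctvLoopA vectors
      (if PySem.Int.mod grey 2 = 1 then PySem.Int.bxor tempvec (PySem.List.pyGetD vectors i 0) else tempvec)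
      (i + 1) (PySem.Int.floordiv grey 2)
termination_by grey.toNat
decreasing_by
  rw [PySem.Int.floordiv_eq_ediv_of_pos (by omega)]
  omega

def createtempvec (vectors : List Int) (grey : Int) : Int :=
  ctvLoopA vectors 0 0 grey

-- ===== PORT B =====
-- the while loop of B: state (tempvec, grey); same divergence guard for grey < 0
def ctvLoopB (vectors : List Int) (tempvec grey : Int) : Int :=
  if grey = 0 then tempvec
  else if h : grey < 0 then tempvec   -- Python loops forever here; excluded by Pre_
  else
    ctvLoopB vectors
      (PySem.Int.bxor tempvec
        (PySem.List.pyGetD vectors ((PySem.Int.bitLength (PySem.Int.band grey (-grey)) : Int) - 1) 0))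
      (PySem.Int.band grey (grey - 1))
termination_by grey.toNat
decreasing_by
  rw [PySem.Int.band_of_nonneg (by omega) (by omega)]
  have := Nat.and_le_right (n := grey.toNat) (m := (grey - 1).toNat)
  omega

def createtempvec_alt (vectors : List Int) (grey : Int) : Int :=
  ctvLoopB vectors 0 grey

-- ===== PRECONDITION & SPEC =====
-- Pre_ = exactly where Python A returns: grey < 0 makes A's while loop run forever, and a set
-- bit of grey at a position ≥ len(vectors) (i.e. grey ≥ 2^len) makes vectors[i] raise IndexError.
def Pre_createtempvec (vectors : List Int) (grey : Int) : Prop :=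
  0 ≤ grey ∧ grey < 2 ^ vectors.length

instance (vectors : List Int) (grey : Int) : Decidable (Pre_createtempvec vectors grey) := by
  unfold Pre_createtempvec; infer_instance

def pvWitness_createtempvec : List Int × Int := ([3, -5, 9], 5)

def Spec_createtempvec (vectors : List Int) (grey : Int) (out : Int) : Prop := out = createtempvec_alt vectors grey
instance (vectors : List Int) (grey : Int) (out : Int) : Decidable (Spec_createtempvec vectors grey out) := by unfold Spec_createtempvec; infer_instance

-- ===== CLAIM (what is proved, stated in full; the proofs are below) =====
def Claim_equal_createtempvec : Prop := ∀ (vectors : List Int) (grey : Int), Dom_createtempvec vectors grey → Pre_createtempvec vectors grey → Spec_createtempvec vectors grey (createtempvec vectors grey)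

-- ===== LEMMAS AND PROOFS =====

-- Nat bit facts used to align the two loops
lemma and_pred_of_odd (n : ℕ) (h : n % 2 = 1) : n &&& (n - 1) = n - 1 := by
  apply Nat.eq_of_testBit_eq
  intro j
  cases j with
  | zero => simp [Nat.testBit_zero]; omega
  | succ j =>
      rw [Nat.testBit_and, Nat.testBit_add_one, Nat.testBit_add_one]
      have : (n - 1) / 2 = n / 2 := by omega
      rw [this, Bool.and_self]

lemma and_pred_two_mul (m : ℕ) (h : 0 < m) :
    (2 * m) &&& (2 * m - 1) = 2 * (m &&& (m - 1)) := by
  apply Nat.eq_of_testBit_eq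
  intro j
  cases j with
  | zero => simp [Nat.testBit_zero]
  | succ j =>
      rw [Nat.testBit_and, Nat.testBit_add_one, Nat.testBit_add_one, Nat.testBit_add_one]
      have h1 : (2 * m) / 2 = m := by omega
      have h2 : (2 * m - 1) / 2 = m - 1 := by omega
      have h3 : (2 * (m &&& (m - 1))) / 2 = m &&& (m - 1) := by omega
      rw [h1, h2, h3, Nat.testBit_and]

lemma and_pred_le (m : ℕ) : m &&& (m - 1) ≤ m - 1 := Nat.and_le_right

-- lowest set bit of a positive n, as Python's  n & -n  computes it through PySem.Int.band
lemma band_neg_self (n : ℕ) (h : 0 < n) :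
    PySem.Int.band (n : Int) (-(n : Int)) = ((n - (n &&& (n - 1)) : ℕ) : Int) := by
  simp only [PySem.Int.band]
  have h1 : (0 : Int) ≤ (n : Int) := by omega
  have h2 : ¬ (0 : Int) ≤ -(n : Int) := by omega
  rw [if_pos h1, if_neg h2]
  have h3 : (-(-(n : Int)) - 1).toNat = n - 1 := by omega
  have h4 : ((n : Int)).toNat = n := by omega
  rw [h3, h4]

lemma lsb_of_odd (n : ℕ) (h : n % 2 = 1) :
    PySem.Int.band (n : Int) (-(n : Int)) = 1 := by
  rw [band_neg_self n (by omega), and_pred_of_odd n h]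
  have : n - (n - 1) = 1 := by omega
  rw [this]; rfl

lemma lsb_double (m : ℕ) (h : 0 < m) :
    PySem.Int.band ((2 * m : ℕ) : Int) (-((2 * m : ℕ) : Int)) =
      2 * PySem.Int.band (m : Int) (-(m : Int)) := by
  rw [band_neg_self (2 * m) (by omega), band_neg_self m h, and_pred_two_mul m h]
  have hle := and_pred_le m
  have : (2 * m) - 2 * (m &&& (m - 1)) = 2 * (m - (m &&& (m - 1))) := by omega
  rw [this]
  push_cast
  ring

lemma lsb_pos (m : ℕ) (h : 0 < m) : 0 < PySem.Int.band (m : Int) (-(m : Int)) := by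
  rw [band_neg_self m h]
  have h1 := and_pred_le m
  omega

lemma bitLength_pos (x : Int) (h : 0 < x) : 1 ≤ PySem.Int.bitLength x := by
  rw [PySem.Int.bitLength_of_pos (n := x) h]; omega

lemma bitLength_two_mul (x : Int) (h : 0 < x) :
    PySem.Int.bitLength (2 * x) = PySem.Int.bitLength x + 1 := by
  rw [PySem.Int.bitLength_of_pos (n := 2 * x) (by omega)]
  have : PySem.Int.floordiv (2 * x) 2 = x := by
    rw [PySem.Int.floordiv_eq_ediv_of_pos (by omega)]; omega
  rw [this]

-- indexing one step deeper is indexing the tail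
lemma pyGetD_shift (xs : List Int) (i : ℕ) (d : Int) :
    PySem.List.pyGetD xs ((i : Int) + 1) d = PySem.List.pyGetD xs.tail (i : Int) d := by
  have : ((i : Int) + 1) = ((i + 1 : ℕ) : Int) := by push_cast; ring
  rw [this, PySem.List.pyGetD_natCast, PySem.List.pyGetD_natCast]
  cases xs <;> simp

-- one unfolding of each loop at a positive Nat-cast grey
lemma loopA_pos (xs : List Int) (t i : Int) (n : ℕ) (h : 0 < n) :
    ctvLoopA xs t i (n : Int) =
      ctvLoopA xs (if n % 2 = 1 then PySem.Int.bxor t (PySem.List.pyGetD xs i 0) else t)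
        (i + 1) ((n / 2 : ℕ) : Int) := by
  rw [ctvLoopA]
  rw [if_neg (by omega), dif_neg (by omega)]
  have hm : PySem.Int.mod (n : Int) 2 = ((n % 2 : ℕ) : Int) := by
    exact_mod_cast PySem.Int.mod_natCast n 2
  have hd : PySem.Int.floordiv (n : Int) 2 = ((n / 2 : ℕ) : Int) := by
    exact_mod_cast PySem.Int.floordiv_natCast n 2
  rw [hm, hd]
  congr 1
  by_cases h2 : n % 2 = 1
  · rw [if_pos h2, if_pos (by rw [h2]; rfl)]
  · rw [if_neg h2, if_neg (by omega)]

lemma loopB_pos (xs : List Int) (t : Int) (n : ℕ) (h : 0 < n) :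
    ctvLoopB xs t (n : Int) =
      ctvLoopB xs
        (PySem.Int.bxor t
          (PySem.List.pyGetD xs
            ((PySem.Int.bitLength (PySem.Int.band (n : Int) (-(n : Int))) : Int) - 1) 0))
        (((n &&& (n - 1) : ℕ)) : Int) := by
  rw [ctvLoopB]
  rw [if_neg (by omega), dif_neg (by omega)]
  have hb : PySem.Int.band (n : Int) ((n : Int) - 1) = ((n &&& (n - 1) : ℕ) : Int) := by
    have : ((n : Int) - 1) = ((n - 1 : ℕ) : Int) := by omega
    rw [this, PySem.Int.band_natCast]
  rw [hb]

-- A with index i+1 over xs  =  A with index i over xs.tail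
lemma loopA_shift (n : ℕ) : ∀ (xs : List Int) (t : Int) (i : ℕ),
    ctvLoopA xs t ((i : Int) + 1) (n : Int) = ctvLoopA xs.tail t (i : Int) (n : Int) := by
  induction n using Nat.strong_induction_on with
  | _ n ih =>
    intro xs t i
    rcases Nat.eq_zero_or_pos n with h0 | h0
    · subst h0
      simp only [Nat.cast_zero]
      conv_lhs => rw [ctvLoopA]
      conv_rhs => rw [ctvLoopA]
      simp
    · rw [loopA_pos xs t _ n h0, loopA_pos xs.tail t _ n h0, pyGetD_shift]
      have hcast : ((i : Int) + 1) + 1 = (((i + 1 : ℕ) : Int)) + 1 := by push_cast; ring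
      rw [hcast, ih (n / 2) (by omega)]
      norm_cast

-- B at grey = 2m over xs  =  B at grey = m over xs.tail
lemma loopB_double (m : ℕ) : ∀ (xs : List Int) (t : Int),
    ctvLoopB xs t ((2 * m : ℕ) : Int) = ctvLoopB xs.tail t (m : Int) := by
  induction m using Nat.strong_induction_on with
  | _ m ih =>
    intro xs t
    rcases Nat.eq_zero_or_pos m with h0 | h0
    · subst h0
      simp only [Nat.mul_zero, Nat.cast_zero]
      conv_lhs => rw [ctvLoopB]
      conv_rhs => rw [ctvLoopB]
      simp
    · rw [loopB_pos xs t (2 * m) (by omega), loopB_pos xs.tail t m h0]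
      have hlsb := lsb_double m h0
      have hpos := lsb_pos m h0
      have hbl : PySem.Int.bitLength (PySem.Int.band ((2 * m : ℕ) : Int) (-((2 * m : ℕ) : Int)))
          = PySem.Int.bitLength (PySem.Int.band (m : Int) (-(m : Int))) + 1 := by
        rw [hlsb, bitLength_two_mul _ hpos]
      have hbl1 := bitLength_pos _ hpos
      set B := PySem.Int.bitLength (PySem.Int.band (m : Int) (-(m : Int))) with hB
      have hidx : (PySem.Int.bitLength (PySem.Int.band ((2 * m : ℕ) : Int) (-((2 * m : ℕ) : Int))) : Int) - 1
          = ((B - 1 : ℕ) : Int) + 1 := by rw [hbl]; omega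
      have hidx2 : (B : Int) - 1 = ((B - 1 : ℕ) : Int) := by omega
      rw [hidx, hidx2, pyGetD_shift]
      have hand : (2 * m) &&& (2 * m - 1) = 2 * (m &&& (m - 1)) := and_pred_two_mul m h0
      rw [hand, ih (m &&& (m - 1)) (by have := and_pred_le m; omega)]

-- the central alignment: B's loop equals A's loop started at index 0
lemma loopB_eq_loopA (n : ℕ) : ∀ (xs : List Int) (t : Int),
    ctvLoopB xs t (n : Int) = ctvLoopA xs t 0 (n : Int) := by
  induction n using Nat.strong_induction_on with
  | _ n ih =>
    intro xs t
    rcases Nat.eq_zero_or_pos n with h0 | h0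
    · subst h0; rw [ctvLoopA, ctvLoopB]; simp
    · rw [loopA_pos xs t 0 n h0]
      have hA1 : (0 : Int) + 1 = ((0 : ℕ) : Int) + 1 := by norm_num
      by_cases hodd : n % 2 = 1
      · -- odd: both xor vectors[0], A recurses at (i=1, n/2), B at n-1 = 2*(n/2)
        rw [loopB_pos xs t n h0, lsb_of_odd n hodd]
        have hbl : PySem.Int.bitLength (1 : Int) = 1 := by decide
        rw [hbl]
        rw [if_pos hodd]
        have hand : n &&& (n - 1) = n - 1 := and_pred_of_odd n hodd
        have hhalf : n - 1 = 2 * (n / 2) := by omega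
        rw [hand, hhalf, loopB_double (n / 2)]
        rw [hA1, loopA_shift (n / 2) xs _ 0]
        have : ((1 : ℕ) : Int) - 1 = (0 : Int) := by norm_num
        rw [this]
        exact ih (n / 2) (by omega) xs.tail _
      · -- even: A skips (i=1, n/2); B's whole remaining run shifts to the tail
        rw [if_neg hodd]
        rw [hA1, loopA_shift (n / 2) xs t 0]
        have hm : n = 2 * (n / 2) := by omega
        have h2 : ((n : ℕ) : Int) = ((2 * (n / 2) : ℕ) : Int) := by omega
        rw [h2, loopB_double (n / 2)]
        exact ih (n / 2) (by omega) xs.tail t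

-- ===== VERDICT (by name: the statement is the Claim_ definition above) =====
theorem createtempvec_spec : Claim_equal_createtempvec := by
  intro vectors grey _hdom hpre
  obtain ⟨hge, _⟩ := hpre
  unfold Spec_createtempvec createtempvec createtempvec_alt
  have h : grey = ((grey.toNat : ℕ) : Int) := by omega
  rw [h, loopB_eq_loopA grey.toNat]
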